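-- pv_equiv track=rewrite | github.com/nova-rey/Crapssim-control | crapssim_control/dsl_parser.py | _line_col
-- ===== SOURCE A (Python) =====
-- def _line_col(source: str, offset: int) -> tuple[int, int, str]:
--     """Return (line, col, snippet) from a 0-based offset into ``source``."""
--
--     lines = source.splitlines(True)
--     total = 0
--     for idx, line in enumerate(lines, start=1):
--         next_total = total + len(line)
--         if offset < next_total:
--             col = offset - total + 1
--             return idx, col, line.rstrip("\n\r")
--         total = next_total
--     if lines:
--         snippet = lines[-1].rstrip("\n\r")
--         return len(lines), len(snippet) + 1, snippet
--     return 1, 1, ""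
-- ===== SOURCE B (Python) =====
-- import bisect
--
--
-- def _line_col(source: str, offset: int) -> tuple[int, int, str]:
--     """Return (line, col, snippet) from a 0-based offset into ``source``."""
--
--     lines = source.splitlines(True)
--     if not lines:
--         return 1, 1, ""
--     starts = [0]
--     for ln in lines:
--         starts.append(starts[-1] + len(ln))
--     i = max(bisect.bisect_right(starts, offset) - 1, 0)
--     if i < len(lines):
--         return i + 1, offset - starts[i] + 1, lines[i].rstrip("\n\r")
--     snippet = lines[-1].rstrip("\n\r")
--     return len(lines), len(snippet) + 1, snippet
-- ===== Notes on version B (the rewrite author's own statement) =====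
-- stated objective: alternative
-- what changed: Replaces A's accumulate-and-early-return linear scan with a precomputed cumulative line-start offset table queried via bisect.bisect_right, recovering line/col/snippet from the found index.
import Mathlib
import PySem

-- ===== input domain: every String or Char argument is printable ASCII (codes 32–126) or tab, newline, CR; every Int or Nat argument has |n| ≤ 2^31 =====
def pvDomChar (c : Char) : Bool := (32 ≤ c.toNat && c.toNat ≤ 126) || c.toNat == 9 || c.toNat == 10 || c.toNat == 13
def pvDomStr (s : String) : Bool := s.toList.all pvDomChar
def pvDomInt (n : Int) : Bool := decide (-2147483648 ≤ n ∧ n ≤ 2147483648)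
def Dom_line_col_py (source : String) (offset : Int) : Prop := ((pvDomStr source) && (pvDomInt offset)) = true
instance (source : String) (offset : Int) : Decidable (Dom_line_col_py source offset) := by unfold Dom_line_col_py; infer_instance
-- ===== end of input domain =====

-- B replaces A's linear accumulate-and-early-return scan by a cumulative line-start
-- offset table queried with bisect_right (alternative decomposition, same cost).

-- shared helper: source.splitlines(True) — exact on the domain's line chars ('\n', '\r', "\r\n";
-- the domain admits no other Python line terminators)
def slk (cur : List Char) : List Char → List (List Char)
  | [] => if cur.isEmpty then [] else [cur.reverse]
  | c :: rest =>
    if c = '\n' then (cur.reverse ++ ['\n']) :: slk [] rest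
    else if c = '\r' then
      if rest.head? = some '\n' then (cur.reverse ++ ['\r', '\n']) :: slk [] rest.tail
      else (cur.reverse ++ ['\r']) :: slk [] rest
    else slk (c :: cur) rest
termination_by l => l.length
decreasing_by all_goals simp [List.length_tail]

-- shared helper: line.rstrip("\n\r") — exact
def rstripNL (l : List Char) : List Char :=
  (l.reverse.dropWhile (fun c => c == '\n' || c == '\r')).reverse

-- ===== PORT A =====
-- A's for-loop with enumerate(start=1) and running total; returns some on the early return
def loopA (offset : Int) : List (List Char) → Int → Int → Option (Int × Int × String)
  | [], _, _ => none
  | l :: rest, idx, total =>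
    let next := total + (l.length : Int)
    if offset < next then some (idx, offset - total + 1, String.ofList (rstripNL l))
    else loopA offset rest (idx + 1) next

def line_col_py (source : String) (offset : Int) : Int × Int × String :=
  let lines := slk [] source.toList
  match loopA offset lines 1 0 with
  | some r => r
  | none =>
    match lines.getLast? with
    | some last =>
      let snippet := rstripNL last
      ((lines.length : Int), (snippet.length : Int) + 1, String.ofList snippet)
    | none => (1, 1, "")

-- ===== PORT B =====
-- starts = [0]; for ln in lines: starts.append(starts[-1] + len(ln))
def buildStarts (t : Int) : List (List Char) → List Int
  | [] => [t]
  | l :: rest => t :: buildStarts (t + (l.length : Int)) rest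

def line_col_py_alt (source : String) (offset : Int) : Int × Int × String :=
  let lines := slk [] source.toList
  match lines.getLast? with
  | none => (1, 1, "")
  | some last =>
    let starts := buildStarts 0 lines
    -- bisect.bisect_right(starts, offset) on the sorted starts = number of leading elements ≤ offset;
    -- Nat subtraction realises Source B's max(… - 1, 0)
    let i : Nat := (starts.takeWhile (fun s => s ≤ offset)).length - 1
    if h : i < lines.length then
      ((i : Int) + 1, offset - starts.getD i 0 + 1, String.ofList (rstripNL lines[i]))
    else
      let snippet := rstripNL last
      ((lines.length : Int), (snippet.length : Int) + 1, String.ofList snippet)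

-- ===== PRECONDITION & SPEC =====
def Spec_line_col_py (source : String) (offset : Int) (out : Int × Int × String) : Prop := out = line_col_py_alt source offset
instance (source : String) (offset : Int) (out : Int × Int × String) : Decidable (Spec_line_col_py source offset out) := by unfold Spec_line_col_py; infer_instance

-- ===== CLAIM (what is proved, stated in full; the proofs are below) =====
def Claim_equal_line_col_py : Prop := ∀ (source : String) (offset : Int), Dom_line_col_py source offset → Spec_line_col_py source offset (line_col_py source offset)

-- ===== LEMMAS AND PROOFS =====

lemma takeWhile_buildStarts_nil (offset s : Int) (ls : List (List Char)) (h : ¬ s ≤ offset) :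
    (buildStarts s ls).takeWhile (fun x => decide (x ≤ offset)) = [] := by
  cases ls <;> simp [buildStarts, List.takeWhile, h]

lemma takeWhile_buildStarts_len_pos (offset s : Int) (ls : List (List Char)) (h : s ≤ offset) :
    1 ≤ ((buildStarts s ls).takeWhile (fun x => decide (x ≤ offset))).length := by
  cases ls <;> simp [buildStarts, List.takeWhile, h]

lemma key (offset : Int) (ls : List (List Char)) : ∀ (tot idx : Int), tot ≤ offset →
    loopA offset ls idx tot =
      (let starts := buildStarts tot ls
       let i : Nat := (starts.takeWhile (fun s => decide (s ≤ offset))).length - 1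
       if h : i < ls.length then
         some (idx + (i : Int), offset - starts.getD i 0 + 1, String.ofList (rstripNL ls[i]))
       else none) := by
  induction ls with
  | nil =>
    intro tot idx h
    simp [loopA, buildStarts, h]
  | cons l rest ih =>
    intro tot idx h
    simp only [loopA, buildStarts]
    by_cases hlt : offset < tot + (l.length : Int)
    · have hn : ¬ (tot + (l.length : Int)) ≤ offset := by omega
      have htw := takeWhile_buildStarts_nil offset _ rest hn
      simp [hlt, List.takeWhile, h, htw]
    · have hle : tot + (l.length : Int) ≤ offset := by omega
      rw [if_neg hlt, ih _ (idx + 1) hle]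
      have hpos := takeWhile_buildStarts_len_pos offset _ rest hle
      simp only [List.takeWhile, h, decide_true]
      obtain ⟨m, hm⟩ : ∃ m,
          ((buildStarts (tot + (l.length : Int)) rest).takeWhile (fun s => decide (s ≤ offset))).length
            = m + 1 :=
        ⟨((buildStarts (tot + (l.length : Int)) rest).takeWhile (fun s => decide (s ≤ offset))).length - 1,
         by omega⟩
      simp only [hm, List.length_cons, Nat.add_sub_cancel]
      by_cases hm2 : m < rest.length
      · rw [dif_pos hm2, dif_pos (by simpa using Nat.succ_lt_succ hm2)]
        simp only [List.getD_cons_succ, List.getElem_cons_succ]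
        congr 1
        push_cast
        ring_nf
      · rw [dif_neg hm2, dif_neg (by simpa using hm2)]

-- ===== VERDICT (by name: the statement is the Claim_ definition above) =====
theorem line_col_py_spec : Claim_equal_line_col_py := by
  intro source offset _
  unfold Spec_line_col_py line_col_py line_col_py_alt
  set lines := slk [] source.toList with hl
  clear hl
  cases lines with
  | nil => simp [loopA]
  | cons l rest =>
    dsimp only
    cases hgl : (l :: rest).getLast? with
    | none => simp at hgl
    | some last =>
      by_cases hneg : offset < 0
      · have hlt : offset < 0 + (l.length : Int) := by omega
        have h0 : ¬ (0 : Int) ≤ offset := by omega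
        have htw : ((buildStarts 0 (l :: rest)).takeWhile (fun x => decide (x ≤ offset))) = [] :=
          takeWhile_buildStarts_nil offset 0 (l :: rest) h0
        simp only [loopA, if_pos hlt]
        rw [htw]
        simp [buildStarts]
      · have h0 : (0 : Int) ≤ offset := by omega
        rw [key offset (l :: rest) 0 1 h0]
        by_cases hcase :
            (((buildStarts 0 (l :: rest)).takeWhile (fun s => decide (s ≤ offset))).length - 1)
              < (l :: rest).length
        · rw [dif_pos hcase]
          dsimp only
          rw [dif_pos hcase]
          simp
          omega
        · rw [dif_neg hcase]
          dsimp only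
          rw [dif_neg hcase]
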